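-- pv_equiv track=rewrite | github.com/dashayushman/playground | sum_list.py | is_sum_in_list
-- ===== SOURCE A (Python) =====
-- def is_sum_in_list(l, k):
--     sum_in_list = False
--     if not l: return sum_in_list
--     memory = {}
--     for val in l:
--         diff = val - k
--         if diff in memory:
--             sum_in_list = True
--             break
--         else:
--             memory[val] = None
--     return sum_in_list
-- ===== SOURCE B (Python) =====
-- def is_sum_in_list(l, k):
--     for i in range(len(l)):
--         for j in range(i + 1, len(l)):
--             if l[j] - l[i] == k:
--                 return True
--     return False
-- ===== Notes on version B (the rewrite author's own statement) =====
-- stated objective: simpler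
-- what changed: Replaced the dict-of-seen-values single scan with a direct nested double loop over all index pairs i<j checking l[j]-l[i]==k, maintaining no auxiliary state.
import Mathlib
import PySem

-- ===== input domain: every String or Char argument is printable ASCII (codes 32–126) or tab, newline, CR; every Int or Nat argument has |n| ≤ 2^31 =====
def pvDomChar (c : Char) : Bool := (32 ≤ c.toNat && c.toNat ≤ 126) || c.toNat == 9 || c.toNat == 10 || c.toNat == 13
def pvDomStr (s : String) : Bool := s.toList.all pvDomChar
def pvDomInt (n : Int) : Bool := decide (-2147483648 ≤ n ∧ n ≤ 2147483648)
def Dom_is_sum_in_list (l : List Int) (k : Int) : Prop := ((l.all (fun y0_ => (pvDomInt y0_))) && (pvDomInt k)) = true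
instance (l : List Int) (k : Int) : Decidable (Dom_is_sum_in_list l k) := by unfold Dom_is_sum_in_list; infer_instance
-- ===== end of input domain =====

-- B replaces A's seen-values dict scan by a plain nested double loop over index pairs i < j ("simpler": no auxiliary state; not faster).

-- ===== PORT A =====
-- the 'for val in l: … break' loop with its dict 'memory' (values are Python None)
def pvALoop (k : Int) : List Int → PySem.Dict Int (Option Unit) → Bool
  | [], _ => false
  | val :: rest, memory =>
    let diff := val - k
    if memory.contains diff then true
    else pvALoop k rest (memory.insert val none)

def is_sum_in_list (l : List Int) (k : Int) : Bool :=
  -- sum_in_list = False; if not l: return sum_in_list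
  if l = [] then false
  else pvALoop k l PySem.Dict.empty

-- ===== PORT B =====
def is_sum_in_list_alt (l : List Int) (k : Int) : Bool :=
  (PySem.List.pyRange 0 (l.length : Int) 1).any (fun i =>
    (PySem.List.pyRange (i + 1) (l.length : Int) 1).any (fun j =>
      PySem.List.pyGetD l j 0 - PySem.List.pyGetD l i 0 == k))

-- ===== PRECONDITION & SPEC =====
def Spec_is_sum_in_list (l : List Int) (k : Int) (out : Bool) : Prop := out = is_sum_in_list_alt l k
instance (l : List Int) (k : Int) (out : Bool) : Decidable (Spec_is_sum_in_list l k out) := by unfold Spec_is_sum_in_list; infer_instance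

-- ===== CLAIM (what is proved, stated in full; the proofs are below) =====
def Claim_equal_is_sum_in_list : Prop := ∀ (l : List Int) (k : Int), Dom_is_sum_in_list l k → Spec_is_sum_in_list l k (is_sum_in_list l k)

-- ===== LEMMAS AND PROOFS =====

-- the common characterization: some pair of indices a < b with l[b] - l[a] = k
def pvE (l : List Int) (k : Int) : Prop :=
  ∃ a b : Nat, a < b ∧ b < l.length ∧ l.getD b 0 - l.getD a 0 = k

theorem pvE_nil (k : Int) : ¬ pvE [] k := by
  rintro ⟨a, b, _, hb, _⟩; simp at hb

theorem pvE_cons (x : Int) (r : List Int) (k : Int) :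
    pvE (x :: r) k ↔ (∃ w ∈ r, w - x = k) ∨ pvE r k := by
  constructor
  · rintro ⟨a, b, hab, hb, he⟩
    match a, b with
    | 0, b + 1 =>
      left
      refine ⟨r.getD b 0, ?_, by simpa using he⟩
      have hb' : b < r.length := by simpa using hb
      rw [List.getD_eq_getElem r 0 hb']
      exact List.getElem_mem hb'
    | a + 1, b + 1 =>
      right
      exact ⟨a, b, by omega, by simpa using hb, by simpa using he⟩
  · rintro (⟨w, hw, he⟩ | ⟨a, b, hab, hb, he⟩)
    · obtain ⟨m, hm, rfl⟩ := List.mem_iff_getElem.mp hw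
      exact ⟨0, m + 1, by omega, by simpa using hm,
        by simp [List.getD, List.getElem?_eq_getElem hm, he]⟩
    · exact ⟨a + 1, b + 1, by omega, by simpa using hb, by simpa using he⟩

theorem pvALoop_iff (k : Int) (l : List Int) (mem : PySem.Dict Int (Option Unit)) :
    pvALoop k l mem = true ↔ (∃ v ∈ l, mem.contains (v - k) = true) ∨ pvE l k := by
  induction l generalizing mem with
  | nil => simp [pvALoop, pvE_nil]
  | cons v r ih =>
    rw [pvALoop]
    by_cases hc : mem.contains (v - k) = true
    · simp [hc, pvE_cons]
    · rw [if_neg (by simp [hc])]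
      rw [ih]
      simp only [PySem.Dict.contains_insert, pvE_cons, List.mem_cons]
      constructor
      · rintro (⟨w, hw, hww⟩ | he)
        · rcases Bool.or_eq_true_iff.mp hww with h1 | h1
          · exact Or.inr (Or.inl ⟨w, hw, by have := beq_iff_eq.mp h1; omega⟩)
          · exact Or.inl ⟨w, Or.inr hw, h1⟩
        · exact Or.inr (Or.inr he)
      · rintro (⟨w, hw | hw, hww⟩ | ⟨w, hw, hww⟩ | he)
        · subst hw; exact absurd hww hc
        · exact Or.inl ⟨w, hw, by simp [hww]⟩
        · exact Or.inl ⟨w, hw, by simp [show w - k = v by omega]⟩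
        · exact Or.inr he

theorem is_sum_iff (l : List Int) (k : Int) : is_sum_in_list l k = true ↔ pvE l k := by
  unfold is_sum_in_list
  by_cases h : l = []
  · simp [h, pvE_nil]
  · rw [if_neg h, pvALoop_iff]
    simp [PySem.Dict.contains_empty]

theorem alt_iff (l : List Int) (k : Int) : is_sum_in_list_alt l k = true ↔ pvE l k := by
  unfold is_sum_in_list_alt pvE
  simp only [List.any_eq_true, PySem.List.mem_pyRange_one, beq_iff_eq]
  constructor
  · rintro ⟨i, ⟨hi0, hin⟩, j, ⟨hij, hjn⟩, he⟩
    refine ⟨i.toNat, j.toNat, by omega, by omega, ?_⟩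
    rw [PySem.List.pyGetD_eq_getElem l (i := i) 0 hi0 (by simpa using hin),
        PySem.List.pyGetD_eq_getElem l (i := j) 0 (by omega) (by simpa using hjn)] at he
    rw [List.getD_eq_getElem l 0 (by omega), List.getD_eq_getElem l 0 (by omega)]
    exact he
  · rintro ⟨a, b, hab, hb, he⟩
    refine ⟨(a : Int), ⟨by omega, by omega⟩, (b : Int), ⟨by omega, by omega⟩, ?_⟩
    rw [PySem.List.pyGetD_natCast, PySem.List.pyGetD_natCast]
    rw [List.getD_eq_getElem l 0 hb, List.getD_eq_getElem l 0 (by omega)] at he ⊢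
    exact he

-- ===== VERDICT (by name: the statement is the Claim_ definition above) =====
theorem is_sum_in_list_spec : Claim_equal_is_sum_in_list := by
  intro l k _
  unfold Spec_is_sum_in_list
  rw [Bool.eq_iff_iff, is_sum_iff, alt_iff]
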